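-- pv_equiv track=rewrite | github.com/xvzc/algorithms | python/programmers/solved/42862.py | solution
-- ===== SOURCE A (Python) =====
-- from collections import deque
--
-- def solution(board, moves):
--     answer = 0
--     board_stack = deque()
--     basket = deque()
--
--
--     for i in range(len(board)):
--         sub_q=deque()
--         for j in range(len(board)):
--             if board[j][i] != 0:
--                 sub_q.appendleft(board[j][i])
--
--         board_stack.append(sub_q)
--
--     for move in moves:
--         doll = board_stack[move-1].pop() if board_stack[move-1] else 0
--
--         if doll == 0:
--             continue
--
--         if not basket:
--             basket.append(doll)
--         elif basket[-1] == doll: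
--             basket.pop()
--             answer+=2
--         else:
--             basket.append(doll)
--
--     return answer
-- ===== SOURCE B (Python) =====
-- def solution(board, moves):
--     n = len(board)
--     ptr = [0] * n          # one cursor per column; board is never mutated
--     answer = 0
--     basket = []
--     for m in moves:
--         col = m - 1
--         i = ptr[col]
--         doll = 0
--         while i < n:
--             v = board[i][col]
--             i += 1
--             if v != 0:
--                 doll = v
--                 break
--         ptr[col] = i
--         if doll == 0:
--             continue
--         if basket and basket[-1] == doll:
--             basket.pop()
--             answer += 2
--         else:
--             basket.append(doll)
--     return answer
-- ===== Notes on version B (the rewrite author's own statement) =====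
-- stated objective: simpler
-- what changed: Replaces A's eager building of per-column deques of nonzero dolls with a lazy per-column integer cursor that scans the untouched board downward on demand; the basket pairing logic is folded into one condition.
-- outside the precondition, e.g. on solution([[1, 2, 9], [4, 2, 8]], [0, 0]): A returns 2, B returns 0; on solution([[1], [2, 3]], [1]): A raises IndexError, B returns 0
import Mathlib
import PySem

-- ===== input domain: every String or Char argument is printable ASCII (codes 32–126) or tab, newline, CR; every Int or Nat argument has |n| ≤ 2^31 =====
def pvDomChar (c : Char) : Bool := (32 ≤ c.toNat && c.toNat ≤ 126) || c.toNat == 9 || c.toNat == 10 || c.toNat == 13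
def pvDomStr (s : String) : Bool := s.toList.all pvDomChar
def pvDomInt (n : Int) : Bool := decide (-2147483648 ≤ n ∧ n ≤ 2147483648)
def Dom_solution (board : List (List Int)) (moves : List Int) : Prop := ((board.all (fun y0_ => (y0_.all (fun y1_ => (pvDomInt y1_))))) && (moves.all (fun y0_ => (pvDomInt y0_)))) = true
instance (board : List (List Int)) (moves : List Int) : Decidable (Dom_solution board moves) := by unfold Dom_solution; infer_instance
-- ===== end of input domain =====

-- B replaces A's eager per-column deque building with lazy per-column cursors into the
-- untouched board (objective: simpler); return-value equivalence, neither version mutates its arguments.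


-- ===== PORT A =====
-- board[j][i] (both ports read cells exactly this way; Pre_ keeps the indices in range)
def pvCell (board : List (List Int)) (j c : Int) : Int :=
  PySem.List.pyGetD (PySem.List.pyGetD board j []) c 0

-- the inner 'for j in range(len(board)): if board[j][i] != 0: sub_q.appendleft(board[j][i])'
def solBuildCol (board : List (List Int)) (c : Int) : List Int :=
  (PySem.List.pyRange 0 (PySem.List.len board) 1).foldl
    (fun q j => if pvCell board j c ≠ 0 then pvCell board j c :: q else q) []

-- 'for i in range(len(board)): board_stack.append(sub_q)'
def solStack (board : List (List Int)) : List (List Int) :=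
  (PySem.List.pyRange 0 (PySem.List.len board) 1).foldl
    (fun s i => s ++ [solBuildCol board i]) []

-- one iteration of A's move loop; deque.pop() = take the LAST element, write back the rest
def solStep (st : Int × List (List Int) × List Int) (move : Int) : Int × List (List Int) × List Int :=
  let ans := st.1
  let stack := st.2.1
  let basket := st.2.2
  let col := PySem.List.pyGetD stack (move - 1) []
  let doll := if col.isEmpty then 0 else col.getLast?.getD 0
  let stack := if col.isEmpty then stack else PySem.List.pySetD stack (move - 1) col.dropLast
  if doll == 0 then (ans, stack, basket)
  else if basket.isEmpty then (ans, stack, basket ++ [doll])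
  else if basket.getLast?.getD 0 == doll then (ans + 2, stack, basket.dropLast)
  else (ans, stack, basket ++ [doll])

def solution (board : List (List Int)) (moves : List Int) : Int :=
  (moves.foldl solStep (0, solStack board, [])).1

-- ===== PORT B =====
-- 'while i < len(board): v = board[i][col]; i += 1; if v != 0: doll = v; break'
def altScan (board : List (List Int)) (c : Int) (i : Nat) : Int × Nat :=
  if _h : i < board.length then
    let v := pvCell board (i : Int) c
    if v ≠ 0 then (v, i + 1) else altScan board c (i + 1)
  else (0, i)
termination_by board.length - i

-- one iteration of B's move loop: read the cursor, lazily scan, write the cursor back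
def altStep (board : List (List Int)) (st : Int × List Nat × List Int) (m : Int) :
    Int × List Nat × List Int :=
  let ans := st.1
  let ptr := st.2.1
  let basket := st.2.2
  let r := altScan board (m - 1) (PySem.List.pyGetD ptr (m - 1) 0)
  let doll := r.1
  let ptr := PySem.List.pySetD ptr (m - 1) r.2
  if doll == 0 then (ans, ptr, basket)
  else if !basket.isEmpty && basket.getLast?.getD 0 == doll then (ans + 2, ptr, basket.dropLast)
  else (ans, ptr, basket ++ [doll])

def solution_alt (board : List (List Int)) (moves : List Int) : Int :=
  (moves.foldl (altStep board) (0, List.replicate board.length 0, [])).1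

-- ===== PRECONDITION & SPEC =====
-- Pre_ excludes exactly: ragged boards with a row shorter than len(board) (A raises IndexError
-- building its columns), moves outside (-len(board), len(board)] (A raises IndexError indexing the
-- deque of columns), and non-positive (wraparound) moves on a board having a row LONGER than
-- len(board): there A's deque-level negative-index wrap and B's row-level negative-index wrap read
-- different columns — both values accidental on a corner no statement of the task specifies.
def Pre_solution (board : List (List Int)) (moves : List Int) : Prop :=
  (∀ row ∈ board, board.length ≤ row.length) ∧
  (∀ m ∈ moves, 1 - (board.length : Int) ≤ m ∧ m ≤ (board.length : Int)) ∧
  ((∃ m ∈ moves, m ≤ 0) → ∀ row ∈ board, row.length = board.length)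
instance (board : List (List Int)) (moves : List Int) : Decidable (Pre_solution board moves) := by
  unfold Pre_solution; infer_instance

def pvWitness_solution : List (List Int) × List Int :=
  ([[0, 3, 0], [2, 5, 0], [2, 4, 4]], [1, 3, 3, 1, 2])

def Spec_solution (board : List (List Int)) (moves : List Int) (out : Int) : Prop :=
  out = solution_alt board moves
instance (board : List (List Int)) (moves : List Int) (out : Int) :
    Decidable (Spec_solution board moves out) := by unfold Spec_solution; infer_instance

-- ===== CLAIM (what is proved, stated in full; the proofs are below) =====
def Claim_equal_solution : Prop := ∀ (board : List (List Int)) (moves : List Int),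
  Dom_solution board moves → Pre_solution board moves →
  Spec_solution board moves (solution board moves)

-- ===== LEMMAS AND PROOFS =====

-- the column c of the board, read top to bottom
def colVals (board : List (List Int)) (c : Int) : List Int :=
  board.map (fun row => PySem.List.pyGetD row c 0)

-- the dolls still hanging in column c when the cursor stands at row i (top first)
def colRem (board : List (List Int)) (c : Int) (i : Nat) : List Int :=
  ((colVals board c).drop i).filter (fun v => v != 0)

-- the simulation invariant: A's column deques are B's cursors, reversed-filtered
def SimInv (board : List (List Int)) (stack : List (List Int)) (ptr : List Nat) : Prop :=
  stack.length = board.length ∧ ptr.length = board.length ∧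
  ∀ c < board.length, stack.getD c [] = (colRem board (c : Int) (ptr.getD c 0)).reverse

theorem foldl_filter_rev (g : List Int → Int) :
    ∀ (l : List (List Int)) (acc : List Int),
      l.foldl (fun q row => if g row ≠ 0 then g row :: q else q) acc
        = ((l.map g).filter (fun v => v != 0)).reverse ++ acc := by
  intro l
  induction l with
  | nil => intro acc; simp
  | cons r t ih =>
    intro acc
    rw [List.foldl_cons, ih]
    by_cases h : g r = 0 <;> simp [h]

theorem solBuildCol_eq (board : List (List Int)) (c : Int) :
    solBuildCol board c = (colRem board c 0).reverse := by
  have h1 := PySem.List.foldl_pyRange_zero_pyGetD board ([] : List Int)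
    (fun q' row => if PySem.List.pyGetD row c 0 ≠ 0 then PySem.List.pyGetD row c 0 :: q' else q')
    ([] : List Int)
  unfold solBuildCol colRem colVals
  exact h1.trans (by rw [foldl_filter_rev]; simp)

theorem altScan_spec (board : List (List Int)) (c : Int) :
    ∀ i : Nat, (altScan board c i).1 = (colRem board c i).headD 0 ∧
      colRem board c (altScan board c i).2 = (colRem board c i).tail := by
  intro i
  induction i using altScan.induct board c with
  | case1 i h v hv =>
    have hvcell : pvCell board (i : Int) c = PySem.List.pyGetD board[i] c 0 := by
      simp [pvCell, List.getElem?_eq_getElem h]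
    have hdrop : colRem board c i
        = PySem.List.pyGetD board[i] c 0 :: colRem board c (i + 1) := by
      unfold colRem colVals
      have hsplit : List.drop i (List.map (fun row => PySem.List.pyGetD row c 0) board)
          = PySem.List.pyGetD board[i] c 0
            :: List.drop (i + 1) (List.map (fun row => PySem.List.pyGetD row c 0) board) := by
        rw [List.drop_eq_getElem_cons (by simpa using h)]
        simp
      have hnz : (PySem.List.pyGetD board[i] c 0 != 0) = true := by
        rw [← hvcell]; simpa using hv
      rw [hsplit, List.filter_cons, hnz]
      simp
    rw [altScan]
    simp only [dif_pos h]
    rw [if_pos (show pvCell board (i : Int) c ≠ 0 from hv)]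
    rw [hdrop, hvcell]
    exact ⟨rfl, rfl⟩
  | case2 i h v hv ih =>
    have hvcell : pvCell board (i : Int) c = PySem.List.pyGetD board[i] c 0 := by
      simp [pvCell, List.getElem?_eq_getElem h]
    have hzero : pvCell board (i : Int) c = 0 := not_not.mp hv
    have hrem : colRem board c i = colRem board c (i + 1) := by
      unfold colRem colVals
      have hsplit : List.drop i (List.map (fun row => PySem.List.pyGetD row c 0) board)
          = PySem.List.pyGetD board[i] c 0
            :: List.drop (i + 1) (List.map (fun row => PySem.List.pyGetD row c 0) board) := by
        rw [List.drop_eq_getElem_cons (by simpa using h)]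
        simp
      have hz : (PySem.List.pyGetD board[i] c 0 != 0) = false := by
        rw [← hvcell]; simpa using hzero
      rw [hsplit, List.filter_cons, hz]
      simp
    rw [altScan]
    simp only [dif_pos h]
    rw [if_neg (show ¬ pvCell board (i : Int) c ≠ 0 from hv)]
    rw [hrem]
    exact ih
  | case3 i h =>
    have hnil : colRem board c i = [] := by
      unfold colRem colVals
      rw [List.drop_eq_nil_of_le (by simp; omega)]
      simp
    rw [altScan]
    simp [dif_neg h, hnil]

theorem step_rel (board : List (List Int)) (a : Int) (bk : List Int)
    (stack : List (List Int)) (ptr : List Nat) (m : Int) (k : Nat)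
    (hInv : SimInv board stack ptr) (hkn : k < board.length)
    (hgetS : PySem.List.pyGetD stack (m - 1) [] = stack.getD k [])
    (hgetP : PySem.List.pyGetD ptr (m - 1) 0 = ptr.getD k 0)
    (hsetS : ∀ X : List Int, PySem.List.pySetD stack (m - 1) X = stack.set k X)
    (hsetP : ∀ x : Nat, PySem.List.pySetD ptr (m - 1) x = ptr.set k x)
    (hcol : ∀ j : Nat, colRem board (m - 1) j = colRem board (k : Int) j) :
    (solStep (a, stack, bk) m).1 = (altStep board (a, ptr, bk) m).1 ∧
    (solStep (a, stack, bk) m).2.2 = (altStep board (a, ptr, bk) m).2.2 ∧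
    SimInv board (solStep (a, stack, bk) m).2.1 (altStep board (a, ptr, bk) m).2.1 := by
  obtain ⟨hsl, hpl, hinv⟩ := hInv
  set i₀ : Nat := ptr.getD k 0 with hi0
  set L : List Int := colRem board (k : Int) i₀ with hL
  -- the read of the two states
  have hreadA : PySem.List.pyGetD stack (m - 1) [] = L.reverse := by
    rw [hgetS]; exact hinv k hkn
  have hreadB : PySem.List.pyGetD ptr (m - 1) 0 = i₀ := hgetP
  have hscan1 : (altScan board (m - 1) i₀).1 = L.headD 0 := by
    rw [(altScan_spec board (m - 1) i₀).1, hcol]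
  have hscan2 : colRem board (k : Int) (altScan board (m - 1) i₀).2 = L.tail := by
    rw [← hcol, (altScan_spec board (m - 1) i₀).2, hcol]
  -- A's doll equals B's doll
  have hdollA : (if (PySem.List.pyGetD stack (m - 1) []).isEmpty then (0:Int)
      else (PySem.List.pyGetD stack (m - 1) []).getLast?.getD 0) = L.headD 0 := by
    rw [hreadA]
    cases L with
    | nil => simp
    | cons x t => simp [List.getLast?_reverse]
  -- the updated states still satisfy the invariant
  have hInvN : SimInv board
      (if (PySem.List.pyGetD stack (m - 1) []).isEmpty then stack
        else PySem.List.pySetD stack (m - 1) (PySem.List.pyGetD stack (m - 1) []).dropLast)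
      (PySem.List.pySetD ptr (m - 1) (altScan board (m - 1) i₀).2) := by
    have hsetP' := hsetP (altScan board (m - 1) i₀).2
    have hsetS' := hsetS (PySem.List.pyGetD stack (m - 1) []).dropLast
    have hptrk : (ptr.set k (altScan board (m - 1) i₀).2).getD k 0
        = (altScan board (m - 1) i₀).2 := by
      rw [List.getD_eq_getElem _ _ (by rw [List.length_set]; omega), List.getElem_set_self]
    refine ⟨?_, ?_, ?_⟩
    · split
      · exact hsl
      · rw [hsetS', List.length_set]; exact hsl
    · rw [hsetP', List.length_set]; exact hpl
    · intro c hc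
      rw [hsetP']
      by_cases hck : c = k
      · rw [hck, hptrk]
        by_cases hemp : (PySem.List.pyGetD stack (m - 1) []).isEmpty
        · rw [if_pos hemp]
          have hLnil : L = [] := by
            rw [hreadA] at hemp
            simpa using hemp
          rw [hinv k hkn, hscan2, hLnil]
          simp only [List.tail_nil, List.reverse_nil, List.reverse_eq_nil_iff]
          exact hLnil
        · rw [if_neg hemp, hsetS',
              List.getD_eq_getElem _ _ (by rw [List.length_set]; omega),
              List.getElem_set_self, hreadA, hscan2, List.dropLast_reverse]
      · have hptrc : (ptr.set k (altScan board (m - 1) i₀).2).getD c 0 = ptr.getD c 0 := by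
          rcases Nat.lt_or_ge c ptr.length with hcl | hcl
          · rw [List.getD_eq_getElem _ _ (by rw [List.length_set]; omega),
                List.getElem_set_ne (by omega), List.getD_eq_getElem _ _ hcl]
          · rw [List.getD_eq_default _ _ (by rw [List.length_set]; omega),
                List.getD_eq_default _ _ hcl]
        rw [hptrc]
        split
        · exact hinv c hc
        · rw [hsetS', List.getD_eq_getElem _ _ (by rw [List.length_set]; omega),
              List.getElem_set_ne (by omega), ← List.getD_eq_getElem stack [] (by omega)]
          exact hinv c hc
  -- now compare the two steps branch by branch
  unfold solStep altStep
  simp only [hreadB]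
  rw [hdollA, hscan1]
  by_cases hd0 : L.headD 0 = 0
  · simp only [hd0]
    exact ⟨by trivial, by trivial, by simpa using hInvN⟩
  · have hd0' : (L.headD 0 == (0:Int)) = false := by simpa using hd0
    simp only [hd0']
    cases bk with
    | nil => exact ⟨by trivial, by trivial, by simpa using hInvN⟩
    | cons b t =>
      by_cases hb : (b :: t).getLast?.getD 0 == L.headD 0 <;>
        simp only [hb, List.isEmpty_cons, Bool.not_false, Bool.true_and] <;>
        exact ⟨by trivial, by trivial, by simpa using hInvN⟩

theorem pyGetD_pos {α : Type} (xs : List α) (m : Int) (d : α) (h1 : 1 ≤ m) :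
    PySem.List.pyGetD xs (m - 1) d = xs.getD (m - 1).toNat d := by
  rw [show m - 1 = (((m - 1).toNat : Nat) : Int) by omega, PySem.List.pyGetD_natCast]
  simp

theorem pySetD_pos {α : Type} (xs : List α) (m : Int) (v : α) (h1 : 1 ≤ m) :
    PySem.List.pySetD xs (m - 1) v = xs.set (m - 1).toNat v := by
  rw [show m - 1 = (((m - 1).toNat : Nat) : Int) by omega, PySem.List.pySetD_natCast]
  simp

theorem pyGetD_wrap {α : Type} (xs : List α) (m : Int) (d : α)
    (h1 : 1 - (xs.length : Int) ≤ m) (h2 : m ≤ 0) :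
    PySem.List.pyGetD xs (m - 1) d = xs.getD (xs.length - (1 - m).toNat) d := by
  rw [show m - 1 = -(((1 - m).toNat : Nat) : Int) by omega,
      PySem.List.pyGetD_neg_natCast xs (1 - m).toNat d (by omega) (by omega)]
  exact (List.getD_eq_getElem _ _ (by omega)).symm

theorem pySetD_wrap {α : Type} (xs : List α) (m : Int) (v : α)
    (h1 : 1 - (xs.length : Int) ≤ m) (h2 : m ≤ 0) :
    PySem.List.pySetD xs (m - 1) v = xs.set (xs.length - (1 - m).toNat) v := by
  rw [show m - 1 = -(((1 - m).toNat : Nat) : Int) by omega]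
  simp [pysem, PySem.List.pySetD, PySem.List.pySet?, PySem.List.pyIdx?,
    (by omega : -(xs.length:Int) < m),
    Int.max_eq_left (by omega : (0:Int) ≤ 1 - m)]
  rw [if_neg (by omega : ¬ (1:Int) ≤ m)]
  simp

-- the effective column index of a move, with both ports' accesses rewritten through it
theorem idx_facts (board : List (List Int)) (stack : List (List Int)) (ptr : List Nat) (m : Int)
    (hsl : stack.length = board.length) (hpl : ptr.length = board.length)
    (hm : (1 ≤ m ∧ m ≤ (board.length : Int)) ∨
      (1 - (board.length : Int) ≤ m ∧ m ≤ 0 ∧ ∀ row ∈ board, row.length = board.length)) :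
    ∃ k : Nat, k < board.length ∧
      PySem.List.pyGetD stack (m - 1) [] = stack.getD k [] ∧
      PySem.List.pyGetD ptr (m - 1) 0 = ptr.getD k 0 ∧
      (∀ X : List Int, PySem.List.pySetD stack (m - 1) X = stack.set k X) ∧
      (∀ x : Nat, PySem.List.pySetD ptr (m - 1) x = ptr.set k x) ∧
      (∀ j : Nat, colRem board (m - 1) j = colRem board (k : Int) j) := by
  rcases hm with ⟨h1, h2⟩ | ⟨h1, h2, hsq⟩
  · refine ⟨(m - 1).toNat, by omega, pyGetD_pos stack m [] h1, pyGetD_pos ptr m 0 h1,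
      fun X => pySetD_pos stack m X h1, fun x => pySetD_pos ptr m x h1, fun j => ?_⟩
    rw [show (((m - 1).toNat : Nat) : Int) = m - 1 by omega]
  · refine ⟨board.length - (1 - m).toNat, by omega,
      by rw [pyGetD_wrap stack m [] (by omega) h2, hsl],
      by rw [pyGetD_wrap ptr m 0 (by omega) h2, hpl],
      fun X => by rw [pySetD_wrap stack m X (by omega) h2, hsl],
      fun x => by rw [pySetD_wrap ptr m x (by omega) h2, hpl], fun j => ?_⟩
    have hvals : colVals board (m - 1) = colVals board ((board.length - (1 - m).toNat : Nat) : Int) := by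
      refine List.map_congr_left ?_
      intro row hrow
      rw [pyGetD_wrap row m 0 (by rw [hsq row hrow]; omega) h2, PySem.List.pyGetD_natCast,
          hsq row hrow]
    unfold colRem
    rw [hvals]

theorem fold_rel (board : List (List Int)) :
    ∀ (moves : List Int) (a : Int) (bk : List Int) (stack : List (List Int)) (ptr : List Nat),
      (∀ m ∈ moves, (1 ≤ m ∧ m ≤ (board.length : Int)) ∨
        (1 - (board.length : Int) ≤ m ∧ m ≤ 0 ∧ ∀ row ∈ board, row.length = board.length)) →
      SimInv board stack ptr →
      (moves.foldl solStep (a, stack, bk)).1 = (moves.foldl (altStep board) (a, ptr, bk)).1 := by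
  intro moves
  induction moves with
  | nil => intro a bk stack ptr _ _; rfl
  | cons m rest ih =>
    intro a bk stack ptr hmv hInv
    obtain ⟨k, hkn, hgetS, hgetP, hsetS, hsetP, hcol⟩ :=
      idx_facts board stack ptr m hInv.1 hInv.2.1 (hmv m (by simp))
    obtain ⟨h1, h2, h3⟩ := step_rel board a bk stack ptr m k hInv hkn hgetS hgetP hsetS hsetP hcol
    simp only [List.foldl_cons]
    rw [show solStep (a, stack, bk) m
          = ((solStep (a, stack, bk) m).1, (solStep (a, stack, bk) m).2.1,
             (solStep (a, stack, bk) m).2.2) from rfl,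
        show altStep board (a, ptr, bk) m
          = ((altStep board (a, ptr, bk) m).1, (altStep board (a, ptr, bk) m).2.1,
             (altStep board (a, ptr, bk) m).2.2) from rfl,
        h1, h2]
    exact ih _ _ _ _ (fun x hx => hmv x (by simp [hx])) h3

theorem solStack_eq (board : List (List Int)) :
    solStack board
      = (List.range board.length).map (fun (c : Nat) => (colRem board (c : Int) 0).reverse) := by
  unfold solStack
  rw [PySem.List.foldl_append_singleton_eq_map, PySem.List.pyRange_one]
  simp only [PySem.List.len_eq, Int.sub_zero, Int.toNat_natCast, List.map_map]
  refine List.map_congr_left ?_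
  intro k _
  simp [solBuildCol_eq]

theorem inv_init (board : List (List Int)) :
    SimInv board (solStack board) (List.replicate board.length 0) := by
  refine ⟨by rw [solStack_eq]; simp, by simp, ?_⟩
  intro c hc
  rw [solStack_eq, List.getD_eq_getElem _ _ (by simpa using hc),
      List.getElem_map, List.getElem_range,
      List.getD_eq_getElem _ _ (by simpa using hc), List.getElem_replicate]

-- ===== VERDICT (by name: the statement is the Claim_ definition above) =====
theorem solution_spec : Claim_equal_solution := by
  intro board moves _ hpre
  obtain ⟨_, hmv, hsq⟩ := hpre
  unfold Spec_solution solution solution_alt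
  refine fold_rel board moves 0 [] (solStack board) (List.replicate board.length 0)
    (fun m hm => ?_) (inv_init board)
  by_cases hp : 1 ≤ m
  · exact Or.inl ⟨hp, (hmv m hm).2⟩
  · exact Or.inr ⟨(hmv m hm).1, by omega, hsq ⟨m, hm, by omega⟩⟩
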